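-- pv_equiv track=rewrite | github.com/chenkkkk/User-purchase-forecast | code/chenzhiliang.py | continue_day
-- ===== SOURCE A (Python) =====
-- def continue_day(dataframe):
--     if len(set(list(dataframe))) <= 1:
--         return -1
--     day_list = sorted(list(set(list(dataframe))))
--     con = 0
--     maxx = 0
--     for i in range(1,len(day_list)):
--         if day_list[i-1] + 1 == day_list[i]:
--             con += 1
--         else:
--             if maxx<con:
--                 maxx = con
--             con = 0
--     return maxx
-- ===== SOURCE B (Python) =====
-- def continue_day(dataframe):
--     days = set(dataframe)
--     if len(days) <= 1:
--         return -1
--     best = 0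
--     for d in days:
--         if d - 1 not in days:
--             end = d + 1
--             while end in days:
--                 end += 1
--             best = max(best, end - 1 - d)
--     return best
-- ===== Notes on version B (the rewrite author's own statement) =====
-- stated objective: alternative
-- what changed: B replaces A's sort-the-distinct-values-then-scan-adjacent-pairs loop by a hash-set longest-consecutive-run scan: for each value whose predecessor is absent it walks the run upward in the set and keeps the largest run step count.
-- intended difference: On inputs whose run of consecutive values containing the maximum is strictly longer than every other run, A returns the best step count among the other runs only (its loop never flushes the final run, e.g. 0 on [1,2,3]), while B returns that longest run's step count (2 on [1,2,3]), the intended longest streak. — e.g. on continue_day([1, 2, 3]): A returns 0, B returns 2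
import Mathlib
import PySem

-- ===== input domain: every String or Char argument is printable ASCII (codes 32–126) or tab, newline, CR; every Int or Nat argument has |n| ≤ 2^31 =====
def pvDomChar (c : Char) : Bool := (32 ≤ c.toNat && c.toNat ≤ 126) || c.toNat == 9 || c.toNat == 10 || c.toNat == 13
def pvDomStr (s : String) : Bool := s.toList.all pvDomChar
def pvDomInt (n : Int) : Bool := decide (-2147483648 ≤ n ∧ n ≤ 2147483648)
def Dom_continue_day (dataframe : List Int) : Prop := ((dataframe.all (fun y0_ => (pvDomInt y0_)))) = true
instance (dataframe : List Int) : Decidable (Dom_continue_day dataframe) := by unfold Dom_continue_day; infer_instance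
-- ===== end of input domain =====

-- B is a hash-set longest-consecutive-run scan instead of A's sort-then-scan loop; where the run
-- containing the maximum is strictly longest, B returns its step count while A misses it (see D_).

-- ===== PORT A =====
def continue_day (dataframe : List Int) : Int :=
  if (PySem.Set.ofList dataframe).length ≤ 1 then -1
  else
    let day_list := PySem.List.sorted (PySem.Set.ofList dataframe) (fun x => x) false
    -- for i in range(1, len(day_list)) with state (con, maxx); indices i-1, i are always in range
    let r := (PySem.List.pyRange 1 (day_list.length : Int) 1).foldl
      (fun (cm : Int × Int) i =>
        if PySem.List.pyGetD day_list (i - 1) 0 + 1 = PySem.List.pyGetD day_list i 0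
        then (cm.1 + 1, cm.2)
        else (0, if cm.2 < cm.1 then cm.1 else cm.2))
      (0, 0)
    r.2

-- ===== PORT B =====
-- the Python 'while end in days: end += 1'; fuel = |days| suffices since each step consumes a
-- distinct member of the set that is ≥ the starting value
def pvWalk (s : List Int) (cur : Int) (fuel : Nat) : Int :=
  match fuel with
  | 0 => cur
  | Nat.succ f => if s.contains cur then pvWalk s (cur + 1) f else cur

def continue_day_alt (dataframe : List Int) : Int :=
  let days : PySem.Set Int := PySem.Set.ofList dataframe
  if days.length ≤ 1 then -1
  else
    days.foldl (fun best d =>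
      if days.contains (d - 1) then best
      else
        let e := pvWalk days (d + 1) days.length
        max best (e - 1 - d)) 0

-- ===== PRECONDITION & SPEC =====
-- On inputs whose run of consecutive values containing the maximum (the last run of the sorted
-- distinct values) is strictly longer than every other run, A returns the best step count among
-- the other runs only (its loop never flushes the final run; 0 on [1,2,3]) while B returns that
-- longest run's step count (2 on [1,2,3]), the intended longest streak.
def D_continue_day (dataframe : List Int) : Prop :=
  let runs := (PySem.List.sorted (PySem.Set.ofList dataframe) id false).splitBy (· + 1 == ·)
  2 ≤ (PySem.Set.ofList dataframe).length ∧
  ∀ g ∈ runs.dropLast, g.length < (runs.getLastD []).length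
instance (dataframe : List Int) : Decidable (D_continue_day dataframe) := by
  unfold D_continue_day; infer_instance

def Spec_continue_day (dataframe : List Int) (out : Int) : Prop :=
  ¬ D_continue_day dataframe → out = continue_day_alt dataframe
instance (dataframe : List Int) (out : Int) : Decidable (Spec_continue_day dataframe out) := by
  unfold Spec_continue_day; infer_instance

def pvDiffWitness_continue_day : List Int := [1, 2, 3]
def pvDiffWitnessOut_continue_day : Int × Int := (0, 2)

-- ===== CLAIM (what is proved, stated in full; the proofs are below) =====
def Claim_unchanged_continue_day : Prop := ∀ (dataframe : List Int), Dom_continue_day dataframe → Spec_continue_day dataframe (continue_day dataframe)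
def Claim_changed_continue_day : Prop := Dom_continue_day (pvDiffWitness_continue_day) ∧ D_continue_day (pvDiffWitness_continue_day) ∧ continue_day (pvDiffWitness_continue_day) = pvDiffWitnessOut_continue_day.1 ∧ continue_day_alt (pvDiffWitness_continue_day) = pvDiffWitnessOut_continue_day.2 ∧ pvDiffWitnessOut_continue_day.1 ≠ pvDiffWitnessOut_continue_day.2
def Claim_exact_continue_day : Prop := ∀ (dataframe : List Int), Dom_continue_day dataframe → D_continue_day dataframe → continue_day dataframe ≠ continue_day_alt dataframe

-- ===== LEMMAS AND PROOFS =====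

-- run pair counts (run length - 1) of a strictly sorted list, as structural recursion
def goRuns (prev con : Int) : List Int → List Int
  | [] => [con]
  | x :: xs => if prev + 1 = x then goRuns x (con + 1) xs else con :: goRuns x 0 xs

def runPairs : List Int → List Int
  | [] => []
  | x :: xs => goRuns x 0 xs

theorem splitByLoop_append_my {α : Type} (r : α → α → Bool) (l : List α) (a : α) (g : List α)
    (gs : List (List α)) :
    List.splitBy.loop r l a g gs = gs.reverse ++ List.splitBy.loop r l a g [] := by
  induction l generalizing a g gs with
  | nil => simp [List.splitBy.loop]
  | cons b l IH =>
    simp_rw [List.splitBy.loop]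
    split <;> rw [IH]
    conv_rhs => rw [IH]
    simp

theorem rp_loop (xs : List Int) (a : Int) (g : List Int) :
    (List.splitBy.loop (fun x y => x + 1 == y) xs a g []).map (fun q => (q.length : Int) - 1)
      = goRuns a (g.length : Int) xs := by
  induction xs generalizing a g with
  | nil => simp [List.splitBy.loop, goRuns]
  | cons b xs ih =>
    simp only [List.splitBy.loop]
    by_cases hr : a + 1 = b
    · have hb : (a + 1 == b) = true := by simpa using hr
      rw [hb]
      show (List.splitBy.loop (fun x y => x + 1 == y) xs b (a :: g) []).map
        (fun q => (q.length : Int) - 1) = _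
      have := ih b (a :: g)
      simp only [List.length_cons] at this
      rw [this]
      simp only [goRuns, if_pos hr]
      push_cast
      rfl
    · have hb : (a + 1 == b) = false := by simpa using hr
      rw [hb]
      show (List.splitBy.loop (fun x y => x + 1 == y) xs b [] [(a :: g).reverse]).map
        (fun q => (q.length : Int) - 1) = _
      rw [splitByLoop_append_my]
      simp only [List.map_append, List.reverse_cons, List.reverse_nil, List.nil_append,
        List.map_cons, List.map_nil]
      rw [ih b []]
      simp only [goRuns, if_neg hr, List.length_nil, Nat.cast_zero]
      simp

theorem runPairs_eq_splitBy (ds : List Int) :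
    (ds.splitBy (fun x y => x + 1 == y)).map (fun q => (q.length : Int) - 1) = runPairs ds := by
  cases ds with
  | nil => rfl
  | cons d0 rest =>
    show (List.splitBy.loop _ rest d0 [] []).map _ = _
    simpa using rp_loop rest d0 []

theorem getLastD_append_singleton {α : Type} (l : List α) (x d : α) :
    (l ++ [x]).getLastD d = x := by
  induction l with
  | nil => rfl
  | cons a t ih =>
    cases t <;> simp_all [List.getLastD]

-- first-run length of a list (length of the maximal initial chain of +1 steps)
def frl : List Int → Nat
  | [] => 0
  | [_] => 1
  | x :: y :: t => if x + 1 = y then frl (y :: t) + 1 else 1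

-- A's loop as structural recursion over the sorted list
def runA (prev con maxx : Int) : List Int → Int
  | [] => maxx
  | x :: xs =>
    if prev + 1 = x then runA x (con + 1) maxx xs
    else runA x 0 (if maxx < con then con else maxx) xs

-- runA with the running maximum factored out
def A' (prev con : Int) : List Int → Int
  | [] => 0
  | x :: xs => if prev + 1 = x then A' x (con + 1) xs else max con (A' x 0 xs)

-- contribution of one element in B's scan
def cfun (ls : List Int) (fuel : Nat) (v : Int) : Int :=
  if ls.contains (v - 1) then 0
  else pvWalk ls (v + 1) fuel - 1 - v

-- running max of a list of Ints from 0
def fmax (l : List Int) : Int := l.foldl (fun x v => max x v) 0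

theorem pvWalk_drop (a : Int) (ls : List Int) (cur : Int) (fuel : Nat) (h : a < cur) :
    pvWalk (a :: ls) cur fuel = pvWalk ls cur fuel := by
  induction fuel generalizing cur with
  | zero => rfl
  | succ f ih =>
    simp only [pvWalk, List.contains_cons]
    have hne : (cur == a) = false := by simp; omega
    rw [hne]
    simp only [Bool.false_or]
    split
    · exact ih (cur + 1) (by omega)
    · rfl

theorem pvWalk_congr (l1 l2 : List Int) (cur : Int) (fuel : Nat)
    (h : ∀ x : Int, x ∈ l1 ↔ x ∈ l2) : pvWalk l1 cur fuel = pvWalk l2 cur fuel := by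
  induction fuel generalizing cur with
  | zero => rfl
  | succ f ih =>
    simp only [pvWalk]
    have hc : l1.contains cur = l2.contains cur := by
      by_cases hx : cur ∈ l1
      · have hx2 : cur ∈ l2 := (h cur).mp hx
        simp [hx, hx2]
      · have hx2 : cur ∉ l2 := fun hy => hx ((h cur).mpr hy)
        simp [hx, hx2]
    rw [hc]
    split
    · exact ih (cur + 1)
    · rfl

theorem pvWalk_run (rest : List Int) (c : Int) (fuel : Nat)
    (hp : (c :: rest).Pairwise (· < ·)) (hf : rest.length ≤ fuel) :
    pvWalk (c :: rest) (c + 1) fuel = c + (frl (c :: rest) : Int) := by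
  induction rest generalizing c fuel with
  | nil =>
    cases fuel with
    | zero => simp [pvWalk, frl]
    | succ f => simp [pvWalk, frl]
  | cons y t ih =>
    cases fuel with
    | zero => simp only [List.length_cons] at hf; omega
    | succ f =>
      have hcy : c < y := (List.pairwise_cons.mp hp).1 y (by simp)
      by_cases hxy : c + 1 = y
      · have hmem : (c :: y :: t).contains (c + 1) = true := by simp; omega
        simp only [pvWalk, hmem, if_true]
        have h1 : pvWalk (c :: y :: t) (c + 1 + 1) f = pvWalk (y :: t) (c + 1 + 1) f :=
          pvWalk_drop c (y :: t) (c + 1 + 1) f (by omega)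
        have h2 : pvWalk (y :: t) (y + 1) f = y + (frl (y :: t) : Int) :=
          ih y f (List.pairwise_cons.mp hp).2 (by simpa using Nat.le_of_succ_le_succ hf)
        have hfrl : frl (c :: y :: t) = frl (y :: t) + 1 := by simp [frl, hxy]
        rw [h1]
        have : c + 1 + 1 = y + 1 := by omega
        rw [this, h2, hfrl]
        push_cast; omega
      · have hnotin : (c + 1) ∉ (c :: y :: t) := by
          intro hmem
          rcases List.mem_cons.mp hmem with h | h
          · omega
          · rcases List.mem_cons.mp h with h | h
            · omega
            · have : y < c + 1 := by
                have := (List.pairwise_cons.mp (List.pairwise_cons.mp hp).2).1 (c+1) h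
                omega
              omega
        have hnm : (c :: y :: t).contains (c + 1) = false := by simp [hnotin]
        have hfrl : frl (c :: y :: t) = 1 := by simp [frl, hxy]
        simp only [pvWalk]
        rw [hnm]
        simp [hfrl]

theorem cfun_drop (a : Int) (ls : List Int) (fuel : Nat) (v : Int) (h : a < v - 1) :
    cfun (a :: ls) fuel v = cfun ls fuel v := by
  unfold cfun
  have hc : (a :: ls).contains (v - 1) = ls.contains (v - 1) := by simp; omega
  rw [hc, pvWalk_drop a ls (v + 1) fuel (by omega)]

theorem cfun_congr (l1 l2 : List Int) (fuel : Nat) (v : Int)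
    (h : ∀ x : Int, x ∈ l1 ↔ x ∈ l2) : cfun l1 fuel v = cfun l2 fuel v := by
  unfold cfun
  have hc : l1.contains (v - 1) = l2.contains (v - 1) := by
    by_cases hx : (v-1) ∈ l1
    · have hx2 : (v-1) ∈ l2 := (h (v-1)).mp hx
      simp [hx, hx2]
    · have hx2 : (v-1) ∉ l2 := fun hy => hx ((h (v-1)).mpr hy)
      simp [hx, hx2]
  rw [hc, pvWalk_congr l1 l2 (v + 1) fuel h]

-- pull a max out of a running-max fold
theorem foldl_max_out (c : Int → Int) (l : List Int) (a b : Int) :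
    l.foldl (fun x v => max x (c v)) (max a b) = max a (l.foldl (fun x v => max x (c v)) b) := by
  induction l generalizing b with
  | nil => rfl
  | cons v t ih =>
    simp only [List.foldl_cons]
    rw [max_assoc, ih (max b (c v))]

theorem foldl_max_nonneg (c : Int → Int) (l : List Int) (b : Int) (hb : 0 ≤ b) :
    0 ≤ l.foldl (fun x v => max x (c v)) b := by
  induction l generalizing b with
  | nil => exact hb
  | cons v t ih => exact ih (max b (c v)) (le_trans hb (le_max_left _ _))

theorem foldl_max_eq_or_mem (c : Int → Int) (l : List Int) :
    l.foldl (fun x v => max x (c v)) 0 = 0 ∨ ∃ v ∈ l, l.foldl (fun x v => max x (c v)) 0 = c v := by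
  induction l with
  | nil => left; rfl
  | cons v t ih =>
    simp only [List.foldl_cons]
    have h0 : max (0 : Int) (c v) = max (c v) 0 := max_comm _ _
    rw [h0, foldl_max_out]
    rcases ih with h | ⟨w, hw, hweq⟩
    · rw [h]
      by_cases hle : c v ≤ 0
      · left; omega
      · right; exact ⟨v, by simp, by omega⟩
    · rw [hweq]
      rcases le_total (c v) (c w) with hle | hle
      · right; exact ⟨w, by simp [hw], by omega⟩
      · right; exact ⟨v, by simp, by omega⟩

theorem le_foldl_max_mem (c : Int → Int) (l : List Int) (v : Int) (hv : v ∈ l) :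
    c v ≤ l.foldl (fun x v => max x (c v)) 0 :=
  (PySem.List.le_foldl_max_int l c 0).2 v hv

-- a running max from 0 depends only on the membership set
theorem foldl_max_mem_congr (c : Int → Int) (l1 l2 : List Int)
    (h : ∀ v : Int, v ∈ l1 ↔ v ∈ l2) :
    l1.foldl (fun x v => max x (c v)) 0 = l2.foldl (fun x v => max x (c v)) 0 := by
  have key : ∀ (a b : List Int), (∀ v : Int, v ∈ a → v ∈ b) →
      a.foldl (fun x v => max x (c v)) 0 ≤ b.foldl (fun x v => max x (c v)) 0 := by
    intro a b hab
    rcases foldl_max_eq_or_mem c a with h0 | ⟨w, hw, hweq⟩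
    · rw [h0]; exact foldl_max_nonneg c b 0 (le_refl 0)
    · rw [hweq]; exact le_foldl_max_mem c b w (hab w hw)
  exact le_antisymm (key l1 l2 fun v => (h v).mp) (key l2 l1 fun v => (h v).mpr)

-- A's indexed loop over range(1, n) equals runA on the corresponding suffix
theorem bridgeA (ds : List Int) (l : List Int) (j : Nat) (p con maxx : Int)
    (hdrop : ds.drop j = p :: l) :
    ((PySem.List.pyRange (↑(j + 1)) (ds.length : Int) 1).foldl
      (fun (cm : Int × Int) i =>
        if PySem.List.pyGetD ds (i - 1) 0 + 1 = PySem.List.pyGetD ds i 0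
        then (cm.1 + 1, cm.2)
        else (0, if cm.2 < cm.1 then cm.1 else cm.2))
      (con, maxx)).2 = runA p con maxx l := by
  induction l generalizing j p con maxx with
  | nil =>
    have hlen : j + 1 = ds.length := by
      have := congrArg List.length hdrop
      simp at this; omega
    rw [PySem.List.pyRange_one_eq_nil (by exact_mod_cast hlen.ge)]
    rfl
  | cons x l' ih =>
    have hlen : j + 1 + (l'.length + 1) = ds.length := by
      have := congrArg List.length hdrop
      simp at this; omega
    have hjlt : (↑(j + 1) : Int) < (ds.length : Int) := by exact_mod_cast (by omega : j + 1 < ds.length)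
    rw [PySem.List.pyRange_one_cons hjlt]
    simp only [List.foldl_cons]
    have hgetj : ds.getD j 0 = p := by
      have h0 : (ds.drop j)[0]? = some p := by rw [hdrop]; rfl
      rw [List.getElem?_drop] at h0
      simp only [Nat.add_zero] at h0
      simp [List.getD, h0]
    have hgetj1 : ds.getD (j + 1) 0 = x := by
      have h1 : (ds.drop j)[1]? = some x := by rw [hdrop]; rfl
      rw [List.getElem?_drop] at h1
      simp [List.getD, h1]
    have e1 : PySem.List.pyGetD ds ((↑(j+1) : Int) - 1) 0 = p := by
      have : (↑(j+1) : Int) - 1 = (↑j : Int) := by push_cast; ring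
      rw [this, PySem.List.pyGetD_natCast, hgetj]
    have e2 : PySem.List.pyGetD ds (↑(j+1) : Int) 0 = x := by
      rw [PySem.List.pyGetD_natCast, hgetj1]
    have hdrop' : ds.drop (j + 1) = x :: l' := by
      have := congrArg (List.drop 1) hdrop
      rwa [List.drop_drop, List.drop_one, List.tail_cons] at this
    have hc : (↑(j + 1) : Int) + 1 = (↑(j + 1 + 1) : Int) := by push_cast; ring
    rw [e1, e2, runA]
    by_cases hpx : p + 1 = x
    · rw [if_pos hpx, if_pos hpx, hc]
      exact ih (j + 1) x (con + 1) maxx hdrop'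
    · rw [if_neg hpx, if_neg hpx, hc]
      exact ih (j + 1) x 0 (if maxx < con then con else maxx) hdrop'

theorem runA_eq_A' (l : List Int) (p con maxx : Int) (hm : 0 ≤ maxx) :
    runA p con maxx l = max maxx (A' p con l) := by
  induction l generalizing p con maxx with
  | nil => simp [runA, A']; omega
  | cons x xs ih =>
    simp only [runA, A']
    by_cases hpx : p + 1 = x
    · rw [if_pos hpx, if_pos hpx]; exact ih x (con + 1) maxx hm
    · rw [if_neg hpx, if_neg hpx]
      have hmx : (if maxx < con then con else maxx) = max maxx con := by
        rcases lt_or_ge maxx con with h | h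
        · simp [h]; omega
        · rw [if_neg (by omega)]; omega
      rw [hmx, ih x 0 (max maxx con) (le_trans hm (le_max_left _ _)), max_assoc]

theorem A'_nonneg (l : List Int) (p con : Int) : 0 ≤ A' p con l := by
  induction l generalizing p con with
  | nil => simp [A']
  | cons x xs ih =>
    simp only [A']
    split
    · exact ih x (con + 1)
    · exact le_trans (ih x 0) (le_max_right _ _)

theorem goRuns_ne_nil (xs : List Int) (prev con : Int) : goRuns prev con xs ≠ [] := by
  induction xs generalizing prev con with
  | nil => simp [goRuns]
  | cons x t ih =>
    simp only [goRuns]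
    split
    · exact ih x (con + 1)
    · simp

theorem fmax_cons (a : Int) (l : List Int) : fmax (a :: l) = max a (fmax l) := by
  show l.foldl (fun x v => max x v) (max 0 a) = max a (l.foldl (fun x v => max x v) 0)
  rw [max_comm 0 a]
  exact foldl_max_out (fun v => v) l a 0

theorem fmax_append_singleton (l : List Int) (x : Int) :
    fmax (l ++ [x]) = max (fmax l) x := by
  simp [fmax, List.foldl_append]

theorem fmax_lt (l : List Int) (x : Int) (hx : 0 < x) (h : ∀ p ∈ l, p < x) : fmax l < x := by
  rcases foldl_max_eq_or_mem (fun v => v) l with h0 | ⟨w, hw, hweq⟩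
  · rw [show fmax l = l.foldl (fun x v => max x v) 0 from rfl, h0]; exact hx
  · rw [show fmax l = l.foldl (fun x v => max x v) 0 from rfl, hweq]; exact h w hw

theorem le_fmax_mem (l : List Int) (v : Int) (hv : v ∈ l) : v ≤ fmax l :=
  le_foldl_max_mem (fun v => v) l v hv

theorem last_decomp {α : Type} (l : List α) (d : α) (h : l ≠ []) :
    l = l.dropLast ++ [l.getLastD d] := by
  have hg : l.getLastD d = l.getLast h := by
    rw [List.getLastD_eq_getLast?, List.getLast?_eq_some_getLast h]
    rfl
  rw [hg]
  exact (List.dropLast_append_getLast h).symm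

-- A's scan equals the max over all runs but the last
theorem A'_eq_goRuns (xs : List Int) (prev con : Int) (hcon : 0 ≤ con) :
    A' prev con xs = fmax (goRuns prev con xs).dropLast := by
  induction xs generalizing prev con with
  | nil => simp [A', goRuns, fmax]
  | cons x t ih =>
    simp only [A', goRuns]
    by_cases hpx : prev + 1 = x
    · rw [if_pos hpx, if_pos hpx]; exact ih x (con + 1) (by omega)
    · rw [if_neg hpx, if_neg hpx]
      have hne := goRuns_ne_nil t x 0
      rw [List.dropLast_cons_of_ne_nil hne, fmax_cons]
      rw [ih x 0 (le_refl 0)]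

-- MAIN INVARIANT: max over all run pair counts = pending run ⊔ fold of B's contributions
theorem mainG (xs : List Int) (prev con : Int) (fuel : Nat)
    (hp : (prev :: xs).Pairwise (· < ·)) (hcon : 0 ≤ con)
    (hf : (prev :: xs).length ≤ fuel) :
    fmax (goRuns prev con xs) =
      max (con + (frl (prev :: xs) : Int) - 1)
        (xs.foldl (fun b v => max b (cfun (prev :: xs) fuel v)) 0) := by
  induction xs generalizing prev con with
  | nil =>
    simp only [goRuns, List.foldl_nil, frl]
    have : fmax [con] = con := by simp [fmax]; omega
    rw [this]
    push_cast; omega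
  | cons y ys ih =>
    have hcy : prev < y := (List.pairwise_cons.mp hp).1 y (by simp)
    have hp' : (y :: ys).Pairwise (· < ·) := (List.pairwise_cons.mp hp).2
    have hf' : (y :: ys).length ≤ fuel := by
      simp only [List.length_cons] at hf ⊢; omega
    have hdropfold : ys.foldl (fun b v => max b (cfun (prev :: y :: ys) fuel v)) 0
        = ys.foldl (fun b v => max b (cfun (y :: ys) fuel v)) 0 := by
      refine PySem.List.foldl_congr_mem ys _ _ 0 ?_
      intro acc v hv
      have hyv : y < v := (List.pairwise_cons.mp hp').1 v hv
      rw [cfun_drop prev (y :: ys) fuel v (by omega)]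
    by_cases hxy : prev + 1 = y
    · -- y continues the pending run
      have hfrl : frl (prev :: y :: ys) = frl (y :: ys) + 1 := by simp [frl, hxy]
      have hcy0 : cfun (prev :: y :: ys) fuel y = 0 := by
        unfold cfun
        have : (prev :: y :: ys).contains (y - 1) = true := by
          have : y - 1 = prev := by omega
          simp [this]
        rw [this]; simp
      simp only [goRuns, if_pos hxy, List.foldl_cons, hcy0]
      rw [ih y (con + 1) hp' (by omega) hf']
      rw [show (max (0:Int) 0) = 0 by simp, hdropfold, hfrl]
      push_cast
      congr 1
      omega
    · -- gap before y: the pending run is closed with count con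
      have hfrl : frl (prev :: y :: ys) = 1 := by simp [frl, hxy]
      have hcfy : cfun (prev :: y :: ys) fuel y = (frl (y :: ys) : Int) - 1 := by
        unfold cfun
        have hnc : (prev :: y :: ys).contains (y - 1) = false := by
          have h1 : (y - 1) ∉ (prev :: y :: ys) := by
            intro hmem
            rcases List.mem_cons.mp hmem with h | h
            · omega
            · rcases List.mem_cons.mp h with h | h
              · omega
              · have := (List.pairwise_cons.mp hp').1 _ h; omega
          simp [h1]
        rw [hnc]
        have hwalk : pvWalk (prev :: y :: ys) (y + 1) fuel = y + (frl (y :: ys) : Int) := by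
          rw [pvWalk_drop prev (y :: ys) (y + 1) fuel (by omega)]
          exact pvWalk_run ys y fuel hp' (by simp only [List.length_cons] at hf; omega)
        simp only [Bool.false_eq_true, if_false]
        rw [hwalk]; omega
      simp only [goRuns, if_neg hxy, List.foldl_cons]
      rw [fmax_cons, ih y 0 hp' (le_refl 0) hf', hcfy, hfrl]
      rw [show max (0:Int) ((frl (y :: ys) : Int) - 1) = max ((frl (y :: ys) : Int) - 1) 0 from max_comm _ _]
      rw [foldl_max_out, hdropfold]
      push_cast
      rw [show con + 1 - 1 = con by ring,
        show (0 : Int) + (frl (y :: ys) : Int) - 1 = (frl (y :: ys) : Int) - 1 by ring]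

-- the values each port computes when there are at least two distinct days
theorem A_val (df : List Int) (h : ¬ (PySem.Set.ofList df).length ≤ 1) :
    continue_day df =
      fmax (runPairs (PySem.List.sorted (PySem.Set.ofList df) (fun x => x) false)).dropLast := by
  have hpair : (PySem.List.sorted (PySem.Set.ofList df) (fun x => x) false).Pairwise (· < ·) :=
    PySem.List.sorted_ofList_pairwise_lt df
  have hlen : (PySem.List.sorted (PySem.Set.ofList df) (fun x => x) false).length
      = (PySem.Set.ofList df).length := PySem.List.length_sorted _ _ _
  set ds := PySem.List.sorted (PySem.Set.ofList df) (fun x => x) false with hds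
  have hdsne : ds ≠ [] := by
    intro hnil; rw [hnil] at hlen; simp at hlen; omega
  obtain ⟨d0, rest, hds0⟩ := List.exists_cons_of_ne_nil hdsne
  have hdrop0 : ds.drop 0 = d0 :: rest := by simpa using hds0
  have hA := bridgeA ds rest 0 d0 0 0 hdrop0
  have hone : ((0 + 1 : Nat) : Int) = 1 := by simp
  rw [hone] at hA
  show (if (PySem.Set.ofList df).length ≤ 1 then (-1 : Int)
    else ((PySem.List.pyRange 1 (ds.length : Int) 1).foldl
      (fun (cm : Int × Int) i =>
        if PySem.List.pyGetD ds (i - 1) 0 + 1 = PySem.List.pyGetD ds i 0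
        then (cm.1 + 1, cm.2)
        else (0, if cm.2 < cm.1 then cm.1 else cm.2)) (0, 0)).2) = _
  rw [if_neg h, hA, runA_eq_A' rest d0 0 0 (le_refl 0),
    max_eq_right (A'_nonneg rest d0 0), A'_eq_goRuns rest d0 0 (le_refl 0), hds0]
  rfl

theorem B_val (df : List Int) (h : ¬ (PySem.Set.ofList df).length ≤ 1) :
    continue_day_alt df =
      fmax (runPairs (PySem.List.sorted (PySem.Set.ofList df) (fun x => x) false)) := by
  have hpair : (PySem.List.sorted (PySem.Set.ofList df) (fun x => x) false).Pairwise (· < ·) :=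
    PySem.List.sorted_ofList_pairwise_lt df
  have hlen : (PySem.List.sorted (PySem.Set.ofList df) (fun x => x) false).length
      = (PySem.Set.ofList df).length := PySem.List.length_sorted _ _ _
  set s := PySem.Set.ofList df with hs
  set ds := PySem.List.sorted s (fun x => x) false with hds
  have hmemsd : ∀ x : Int, x ∈ ds ↔ x ∈ s := by
    intro x; rw [hds]; exact PySem.List.mem_sorted s (fun x => x) false x
  have hdsne : ds ≠ [] := by
    intro hnil; rw [hnil] at hlen; simp at hlen; omega
  obtain ⟨d0, rest, hds0⟩ := List.exists_cons_of_ne_nil hdsne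
  have hpair0 : (d0 :: rest).Pairwise (· < ·) := hds0 ▸ hpair
  -- B's loop body is a running max of cfun contributions
  have hbody : ∀ (l : List Int) (b : Int), 0 ≤ b →
      l.foldl (fun best d =>
        if s.contains (d - 1) then best
        else max best (pvWalk s (d + 1) s.length - 1 - d)) b
      = l.foldl (fun x v => max x (cfun s s.length v)) b := by
    intro l
    induction l with
    | nil => intro b _; rfl
    | cons v t ihl =>
      intro b hb
      simp only [List.foldl_cons]
      have hstep : (if s.contains (v - 1) then b
          else max b (pvWalk s (v + 1) s.length - 1 - v)) = max b (cfun s s.length v) := by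
        unfold cfun
        simp only [PySem.Set.contains_eq_listContains]
        by_cases hq : (v - 1) ∈ s
        · simp [hq]
          omega
        · simp [hq]
      rw [hstep]
      exact ihl (max b (cfun s s.length v)) (le_trans hb (le_max_left _ _))
  show (if s.length ≤ 1 then (-1 : Int)
    else s.foldl (fun best d =>
      if s.contains (d - 1) then best
      else max best (pvWalk s (d + 1) s.length - 1 - d)) 0) = _
  rw [if_neg h, hbody s 0 (le_refl 0)]
  rw [foldl_max_mem_congr (cfun s s.length) s ds (fun v => (hmemsd v).symm)]
  have hcc : ds.foldl (fun x v => max x (cfun s s.length v)) 0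
      = ds.foldl (fun x v => max x (cfun ds s.length v)) 0 :=
    PySem.List.foldl_congr_mem ds _ _ 0
      (fun acc v _ => by rw [cfun_congr s ds s.length v (fun x => (hmemsd x).symm)])
  rw [hcc, hds0, List.foldl_cons]
  have hfuel : (d0 :: rest).length ≤ s.length := by
    rw [hds0] at hlen; omega
  have hcf0 : cfun (d0 :: rest) s.length d0 = (frl (d0 :: rest) : Int) - 1 := by
    unfold cfun
    have hnc : (d0 :: rest).contains (d0 - 1) = false := by
      have h1 : (d0 - 1) ∉ (d0 :: rest) := by
        intro hmem
        rcases List.mem_cons.mp hmem with hm | hm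
        · omega
        · have := (List.pairwise_cons.mp hpair0).1 _ hm; omega
      simp [h1]
    rw [hnc]
    have hwalk : pvWalk (d0 :: rest) (d0 + 1) s.length = d0 + (frl (d0 :: rest) : Int) :=
      pvWalk_run rest d0 s.length hpair0 (by simp only [List.length_cons] at hfuel; omega)
    simp only [Bool.false_eq_true, if_false]
    rw [hwalk]; omega
  rw [hcf0]
  have hmg := mainG rest d0 0 s.length hpair0 (le_refl 0) hfuel
  have hz : (0 : Int) + (frl (d0 :: rest) : Int) - 1 = (frl (d0 :: rest) : Int) - 1 := by omega
  rw [hz] at hmg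
  rw [show max (0:Int) ((frl (d0 :: rest) : Int) - 1) = max ((frl (d0 :: rest) : Int) - 1) 0
    from max_comm _ _, foldl_max_out, ← hmg]
  rfl

-- ===== VERDICT =====

-- common bridge: with at least two distinct values, translate D_'s run-length conditions on the
-- splitBy runs into conditions on the run pair-count list runPairs
theorem rs_facts (df : List Int) (h : ¬ (PySem.Set.ofList df).length ≤ 1) :
    (runPairs (PySem.List.sorted (PySem.Set.ofList df) (fun x => x) false)).dropLast
      = ((PySem.List.sorted (PySem.Set.ofList df) (fun x => x) false).splitBy
          (fun a b => a + 1 == b)).dropLast.map (fun q => (q.length : Int) - 1) ∧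
    (runPairs (PySem.List.sorted (PySem.Set.ofList df) (fun x => x) false)).getLastD 0
      = ((((PySem.List.sorted (PySem.Set.ofList df) (fun x => x) false).splitBy
          (fun a b => a + 1 == b)).getLastD []).length : Int) - 1 := by
  set ds := PySem.List.sorted (PySem.Set.ofList df) (fun x => x) false with hds
  have hlen : ds.length = (PySem.Set.ofList df).length := PySem.List.length_sorted _ _ _
  have hdsne : ds ≠ [] := by
    intro hnil; rw [hnil] at hlen; simp at hlen; omega
  set rs := ds.splitBy (fun a b => a + 1 == b) with hrs
  have hrsne : rs ≠ [] := List.splitBy_ne_nil.mpr hdsne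
  have hdec : rs = rs.dropLast ++ [rs.getLastD []] := last_decomp rs [] hrsne
  have hmap : runPairs ds = rs.map (fun q => (q.length : Int) - 1) :=
    (runPairs_eq_splitBy ds).symm
  constructor
  · rw [hmap]
    conv_lhs => rw [hdec]
    rw [List.map_append, List.map_cons, List.map_nil, List.dropLast_concat]
  · rw [hmap]
    conv_lhs => rw [hdec]
    rw [List.map_append, List.map_cons, List.map_nil]
    exact getLastD_append_singleton _ _ _

theorem continue_day_spec : Claim_unchanged_continue_day := by
  intro df _ hnd
  show continue_day df = continue_day_alt df
  by_cases h : (PySem.Set.ofList df).length ≤ 1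
  · show (if (PySem.Set.ofList df).length ≤ 1 then (-1 : Int) else _)
      = (if (PySem.Set.ofList df).length ≤ 1 then (-1 : Int) else _)
    rw [if_pos h, if_pos h]
  · rw [A_val df h, B_val df h]
    obtain ⟨hdl, hlast⟩ := rs_facts df h
    set ds := PySem.List.sorted (PySem.Set.ofList df) (fun x => x) false with hds
    set rs := ds.splitBy (fun a b => a + 1 == b) with hrs
    set rp := runPairs ds with hrp
    -- ¬ D_ gives an earlier run at least as long as the last one
    have hD : ¬ (2 ≤ (PySem.Set.ofList df).length ∧
        ∀ g ∈ rs.dropLast, g.length < (rs.getLastD []).length) := hnd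
    have h2 : 2 ≤ (PySem.Set.ofList df).length := by omega
    obtain ⟨g, hg, hge⟩ : ∃ g ∈ rs.dropLast, (rs.getLastD []).length ≤ g.length := by
      have hna := not_and.mp hD h2
      simpa using hna
    have hp : ((g.length : Int) - 1) ∈ rp.dropLast := by
      rw [hdl]
      exact List.mem_map_of_mem hg
    have hple : rp.getLastD 0 ≤ (g.length : Int) - 1 := by
      rw [hlast]
      omega
    have hrpne : rp ≠ [] := by
      intro hnil
      rw [hnil] at hdl hp
      simp at hp
    have hdecomp : rp = rp.dropLast ++ [rp.getLastD 0] := last_decomp rp 0 hrpne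
    rw [hdecomp, fmax_append_singleton]
    have hle : rp.getLastD 0 ≤ fmax rp.dropLast :=
      le_trans hple (le_fmax_mem rp.dropLast _ hp)
    have hdd : (rp.dropLast ++ [rp.getLastD 0]).dropLast = rp.dropLast := by simp
    rw [hdd]
    omega

theorem continue_day_changed : Claim_changed_continue_day := by
  unfold Claim_changed_continue_day; decide

theorem continue_day_tight : Claim_exact_continue_day := by
  intro df _ hd
  obtain ⟨h2, hall⟩ := hd
  have h : ¬ (PySem.Set.ofList df).length ≤ 1 := by omega
  rw [A_val df h, B_val df h]
  obtain ⟨hdl, hlast⟩ := rs_facts df h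
  set ds := PySem.List.sorted (PySem.Set.ofList df) (fun x => x) false with hds
  set rs := ds.splitBy (fun a b => a + 1 == b) with hrs
  set rp := runPairs ds with hrp
  have hall : ∀ g ∈ rs.dropLast, g.length < (rs.getLastD []).length := hall
  have hlen : ds.length = (PySem.Set.ofList df).length := PySem.List.length_sorted _ _ _
  have hdsne : ds ≠ [] := by
    intro hnil; rw [hnil] at hlen; simp at hlen; omega
  have hrsne : rs ≠ [] := List.splitBy_ne_nil.mpr hdsne
  -- every element of rp.dropLast is strictly below the final pair count
  have hallp : ∀ p ∈ rp.dropLast, p < rp.getLastD 0 := by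
    intro p hp
    rw [hdl] at hp
    obtain ⟨g, hg, hpg⟩ := List.mem_map.mp hp
    have := hall g hg
    rw [hlast, ← hpg]
    omega
  -- the final pair count is positive
  have hpos : 0 < rp.getLastD 0 := by
    rw [hlast]
    cases hdlc : rs.dropLast with
    | nil =>
      -- a single run: it is all of ds, which has at least two elements
      have hrs1 : rs = [rs.getLastD []] := by
        conv_lhs => rw [last_decomp rs [] hrsne]
        rw [hdlc]
        rfl
      have hflat : rs.flatten = ds := List.flatten_splitBy _ ds
      rw [hrs1] at hflat
      simp at hflat
      have : (rs.getLastD []).length = ds.length := by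
        rw [List.getLastD_eq_getLast?, hflat]
      omega
    | cons g t =>
      have hg : g ∈ rs.dropLast := by rw [hdlc]; simp
      have hgmem : g ∈ rs := List.dropLast_subset rs hg
      have hgne : g ≠ [] := List.ne_nil_of_mem_splitBy hgmem
      have hglen : 1 ≤ g.length := List.length_pos_iff.mpr hgne
      have := hall g hg
      omega
  have hlt : fmax rp.dropLast < rp.getLastD 0 := fmax_lt _ _ hpos hallp
  have hrpne : rp ≠ [] := by
    have hmap : rp = rs.map (fun q => (q.length : Int) - 1) := (runPairs_eq_splitBy ds).symm
    intro hnil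
    rw [hnil] at hmap
    exact hrsne (List.map_eq_nil_iff.mp hmap.symm)
  have hdecomp : rp = rp.dropLast ++ [rp.getLastD 0] := last_decomp rp 0 hrpne
  rw [hdecomp, fmax_append_singleton]
  have hdd : (rp.dropLast ++ [rp.getLastD 0]).dropLast = rp.dropLast := by simp
  rw [hdd]
  omega
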